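-- pv_equiv track=rewrite | github.com/nishkalavallabhi/LING520-Fall2016 | LING520/CodeSamples/Week7/A3Q1-Tagger.py | return_max_count_tag
-- ===== SOURCE A (Python) =====
-- def return_max_count_tag(tag_options):
--     max_count_index = 0
--     max_count = 0
--     for item in tag_options:
--         if len(item.strip().split(" ")) > 3:
--             temp_count = int(item.strip().split(" ")[-1])
--             if temp_count > max_count:
--                 max_count = temp_count
--                 max_count_index = tag_options.index(item)
--     return tag_options[max_count_index]
-- ===== SOURCE B (Python) =====
-- def return_max_count_tag(tag_options):
--     candidates = []
--     for i, item in enumerate(tag_options):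
--         fields = item.strip().split(" ")
--         if len(fields) > 3:
--             count = int(fields[-1])
--             if count > 0:
--                 candidates.append((i, count))
--     if not candidates:
--         return tag_options[0]
--     ordered = sorted(candidates, key=lambda t: (-t[1], t[0]))
--     return tag_options[ordered[0][0]]
-- ===== Notes on version B (the rewrite author's own statement) =====
-- stated objective: alternative
-- what changed: A makes one running-max pass that re-splits each item twice and re-scans the whole list with list.index on every new maximum; B collects the (index, count) candidates in a single enumerate pass, then sorts them by (-count, index) and indexes with the first one (falling back to tag_options[0] when no positive candidate exists).
import Mathlib
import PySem

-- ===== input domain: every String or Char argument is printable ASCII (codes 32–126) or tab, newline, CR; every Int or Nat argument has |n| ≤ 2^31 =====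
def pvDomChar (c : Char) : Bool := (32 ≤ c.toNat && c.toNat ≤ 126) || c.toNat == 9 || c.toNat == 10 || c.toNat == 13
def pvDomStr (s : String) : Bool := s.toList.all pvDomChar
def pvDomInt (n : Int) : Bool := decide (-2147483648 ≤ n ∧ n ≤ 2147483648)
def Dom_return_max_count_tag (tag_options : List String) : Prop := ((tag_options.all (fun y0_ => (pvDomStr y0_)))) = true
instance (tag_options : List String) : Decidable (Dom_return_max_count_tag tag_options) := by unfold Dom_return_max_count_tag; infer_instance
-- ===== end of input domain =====

-- B replaces A's single running-max pass (which re-splits each item and re-scans the list with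
-- list.index) by collecting the (index, count) candidates once and sorting them by (-count, index);
-- objective: alternative decomposition of the same selection.

-- ===== PORT A =====
-- item.strip().split(" ") (shared shape helper; A recomputes it, the value is the same)
def pvFields (item : String) : List (List Char) :=
  PySem.Chars.splitOn (PySem.Chars.strip item.toList) [' ']

def return_max_count_tag (tag_options : List String) : String :=
  let st := tag_options.foldl
    (fun (st : Int × Int) item =>
      if 3 < (pvFields item).length then
        match PySem.List.pyGet? (pvFields item) (-1) with
        | none => st              -- unreachable: a split with > 3 fields is nonempty
        | some lastField =>
          match PySem.Int.ofChars? lastField with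
          | none => st            -- int() raises ValueError here; excluded by Pre_
          | some tempCount =>
            if tempCount > st.2 then
              ((((PySem.List.index? tag_options item).getD 0 : Nat) : Int), tempCount)
            else st
      else st)
    ((0 : Int), (0 : Int))
  (PySem.List.pyGet? tag_options st.1).getD ""   -- IndexError (empty list) excluded by Pre_

-- ===== PORT B =====
def return_max_count_tag_alt (tag_options : List String) : String :=
  let candidates := (PySem.List.enumerate tag_options 0).foldl
    (fun (acc : List (Int × Int)) p =>
      if 3 < (pvFields p.2).length then
        match PySem.List.pyGet? (pvFields p.2) (-1) with
        | none => acc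
        | some lastField =>
          match PySem.Int.ofChars? lastField with
          | none => acc           -- int() raises ValueError here; excluded by Pre_
          | some count => if count > 0 then acc ++ [(p.1, count)] else acc
      else acc)
    []
  if candidates.isEmpty then (PySem.List.pyGet? tag_options 0).getD ""   -- IndexError excluded by Pre_
  else
    let ordered := PySem.List.sorted2 candidates (fun t => -t.2) (fun t => t.1)
    (PySem.List.pyGet? tag_options ((PySem.List.pyGet? ordered 0).getD (0, 0)).1).getD ""

-- ===== PRECONDITION & SPEC =====
-- Pre_ excludes exactly the inputs where Python A raises: the empty list (IndexError on
-- tag_options[0]) and lists containing an item of > 3 space-split fields whose last field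
-- is not int()-parsable (ValueError).
def Pre_return_max_count_tag (tag_options : List String) : Prop :=
  tag_options ≠ [] ∧ ∀ item ∈ tag_options, 3 < (pvFields item).length →
    ((PySem.List.pyGet? (pvFields item) (-1)).bind PySem.Int.ofChars?).isSome
instance (tag_options : List String) : Decidable (Pre_return_max_count_tag tag_options) := by
  unfold Pre_return_max_count_tag; infer_instance
def pvWitness_return_max_count_tag : List String := ["a b c 5", "d e f 7", "x"]

def Spec_return_max_count_tag (tag_options : List String) (out : String) : Prop := out = return_max_count_tag_alt tag_options
instance (tag_options : List String) (out : String) : Decidable (Spec_return_max_count_tag tag_options out) := by unfold Spec_return_max_count_tag; infer_instance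

-- ===== CLAIM (what is proved, stated in full; the proofs are below) =====
def Claim_equal_return_max_count_tag : Prop := ∀ (tag_options : List String), Dom_return_max_count_tag tag_options → Pre_return_max_count_tag tag_options → Spec_return_max_count_tag tag_options (return_max_count_tag tag_options)

-- ===== LEMMAS AND PROOFS =====

-- the candidate (index, count) an item at enumerate-position p contributes in B (if any)
def pvCandOf (p : Int × String) : Option (Int × Int) :=
  if 3 < (pvFields p.2).length then
    match PySem.List.pyGet? (pvFields p.2) (-1) with
    | none => none
    | some lastField =>
      match PySem.Int.ofChars? lastField with
      | none => none
      | some count => if count > 0 then some (p.1, count) else none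
  else none

-- A's running-max update on candidate pairs
def pvMStep (st y : Int × Int) : Int × Int := if y.2 > st.2 then y else st

lemma pvCandOf_elim {p : Int × String} {q : Int × Int} (h : pvCandOf p = some q) :
    q.1 = p.1 ∧ 0 < q.2 := by
  unfold pvCandOf at h
  split at h
  · cases hg : PySem.List.pyGet? (pvFields p.2) (-1) with
    | none => simp [hg] at h
    | some lf =>
      cases ho : PySem.Int.ofChars? lf with
      | none => simp [hg, ho] at h
      | some c =>
        simp only [hg, ho] at h
        split at h
        · cases h
          refine ⟨rfl, ?_⟩
          show (0 : Int) < c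
          omega
        · simp at h
  · simp at h

lemma pvCandOf_fst {p : Int × String} {q : Int × Int} (h : pvCandOf p = some q) : q.1 = p.1 :=
  (pvCandOf_elim h).1

lemma pvCandOf_pos {p : Int × String} {q : Int × Int} (h : pvCandOf p = some q) : 0 < q.2 :=
  (pvCandOf_elim h).2

-- B's collecting loop is filterMap pvCandOf
lemma pvCands_eq (l : List (Int × String)) (acc : List (Int × Int)) :
    l.foldl
      (fun (acc : List (Int × Int)) p =>
        if 3 < (pvFields p.2).length then
          match PySem.List.pyGet? (pvFields p.2) (-1) with
          | none => acc
          | some lastField =>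
            match PySem.Int.ofChars? lastField with
            | none => acc
            | some count => if count > 0 then acc ++ [(p.1, count)] else acc
        else acc)
      acc = acc ++ l.filterMap pvCandOf := by
  induction l generalizing acc with
  | nil => simp
  | cons p t ih =>
    have hstep : (if 3 < (pvFields p.2).length then
        match PySem.List.pyGet? (pvFields p.2) (-1) with
        | none => acc
        | some lastField =>
          match PySem.Int.ofChars? lastField with
          | none => acc
          | some count => if count > 0 then acc ++ [(p.1, count)] else acc
        else acc) = acc ++ (pvCandOf p).toList := by
      unfold pvCandOf
      split
      · cases hg : PySem.List.pyGet? (pvFields p.2) (-1) with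
        | none => simp
        | some lf =>
          cases ho : PySem.Int.ofChars? lf with
          | none => simp [ho]
          | some c =>
            simp only [ho]
            split <;> simp
      · simp
    simp only [List.foldl_cons, hstep, ih, List.filterMap_cons]
    rcases pvCandOf p with _ | q <;> simp

-- distinct first components along the candidate list
lemma pvPairwise_fst (ts : List String) :
    (List.filterMap pvCandOf (PySem.List.enumerate ts 0)).Pairwise (fun a b => a.1 < b.1) := by
  rw [List.pairwise_filterMap]
  have := PySem.List.pairwise_lt_enumerate ts 0
  exact this.imp (by
    intro a b hab x hx y hy
    rw [pvCandOf_fst hx, pvCandOf_fst hy]; exact hab)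

lemma pvFst_inj {l : List (Int × Int)} (h : l.Pairwise (fun a b => a.1 < b.1))
    {a b : Int × Int} (ha : a ∈ l) (hb : b ∈ l) (hab : a.1 = b.1) : a = b := by
  induction l with
  | nil => cases ha
  | cons x t ih =>
    rcases List.pairwise_cons.mp h with ⟨hx, ht⟩
    rcases List.mem_cons.mp ha with rfl | ha' <;> rcases List.mem_cons.mp hb with rfl | hb'
    · rfl
    · exact absurd hab (by have := hx b hb'; omega)
    · exact absurd hab (by have := hx a ha'; omega)
    · exact ih ht ha' hb'

-- first-strict-max characterisation of A's running-max fold over candidate pairs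
lemma pvFold_max_spec (C : List (Int × Int)) (hpw : C.Pairwise (fun a b => a.1 < b.1)) :
    ∀ st : Int × Int,
      (C.foldl pvMStep st = st ∨ C.foldl pvMStep st ∈ C) ∧
      st.2 ≤ (C.foldl pvMStep st).2 ∧
      (∀ y ∈ C, y.2 ≤ (C.foldl pvMStep st).2) ∧
      (∀ y ∈ C, y.2 = (C.foldl pvMStep st).2 → C.foldl pvMStep st = st ∨ (C.foldl pvMStep st).1 ≤ y.1) ∧
      (C.foldl pvMStep st ≠ st → st.2 < (C.foldl pvMStep st).2) := by
  induction C with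
  | nil => intro st; simp
  | cons a t ih =>
    intro st
    rcases List.pairwise_cons.mp hpw with ⟨ha, ht⟩
    have iht := ih ht
    by_cases hc : a.2 > st.2
    · have hstep : List.foldl pvMStep st (a :: t) = List.foldl pvMStep a t := by
        simp [pvMStep, hc]
      rcases iht a with ⟨hmem, hle, hmax, hfirst, hstrict⟩
      set r := List.foldl pvMStep a t with hr
      rw [hstep]
      have hlt : st.2 < r.2 := lt_of_lt_of_le hc hle
      refine ⟨?_, le_of_lt hlt, ?_, ?_, fun _ => hlt⟩
      · rcases hmem with h | h
        · exact Or.inr (by rw [h]; exact List.mem_cons_self)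
        · exact Or.inr (List.mem_cons_of_mem a h)
      · intro y hy
        rcases List.mem_cons.mp hy with rfl | hy'
        · omega
        · exact hmax y hy'
      · intro y hy hye
        rcases List.mem_cons.mp hy with rfl | hy'
        · by_cases hre : r = y
          · exact Or.inr (le_of_eq (by rw [hre]))
          · have := hstrict hre
            exact absurd hye (by omega)
        · rcases hfirst y hy' hye with h | h
          · exact Or.inr (by rw [h]; exact le_of_lt (ha y hy'))
          · exact Or.inr h
    · have hstep : List.foldl pvMStep st (a :: t) = List.foldl pvMStep st t := by
        simp [pvMStep, hc]
      rcases iht st with ⟨hmem, hle, hmax, hfirst, hstrict⟩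
      set r := List.foldl pvMStep st t with hr
      rw [hstep]
      refine ⟨?_, hle, ?_, ?_, hstrict⟩
      · rcases hmem with h | h
        · exact Or.inl h
        · exact Or.inr (List.mem_cons_of_mem a h)
      · intro y hy
        rcases List.mem_cons.mp hy with rfl | hy'
        · omega
        · exact hmax y hy'
      · intro y hy hye
        rcases List.mem_cons.mp hy with rfl | hy'
        · left
          by_contra hne
          have := hstrict hne
          omega
        · exact hfirst y hy' hye

-- lockstep: A's fold over the items equals (up to count and looked-up string) the
-- candidate fold over the enumerated list
def pvR (ts : List String) (stA stS : Int × Int) : Prop :=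
  stA.2 = stS.2 ∧ 0 ≤ stA.2 ∧
    (PySem.List.pyGet? ts stA.1).getD "" = (PySem.List.pyGet? ts stS.1).getD ""

lemma pvLockstep (ts : List String) (l : List (Int × String))
    (hl : ∀ p ∈ l, PySem.List.pyGet? ts p.1 = some p.2 ∧ p.2 ∈ ts) :
    ∀ stA stS, pvR ts stA stS →
      pvR ts
        (l.foldl
          (fun (st : Int × Int) p =>
            if 3 < (pvFields p.2).length then
              match PySem.List.pyGet? (pvFields p.2) (-1) with
              | none => st
              | some lastField =>
                match PySem.Int.ofChars? lastField with
                | none => st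
                | some tempCount =>
                  if tempCount > st.2 then
                    ((((PySem.List.index? ts p.2).getD 0 : Nat) : Int), tempCount)
                  else st
            else st) stA)
        (l.foldl
          (fun (st : Int × Int) p =>
            match pvCandOf p with
            | some y => pvMStep st y
            | none => st) stS) := by
  induction l with
  | nil => intro stA stS h; exact h
  | cons p t ih =>
    intro stA stS h
    rcases h with ⟨hcnt, hnn, hstr⟩
    rcases hl p List.mem_cons_self with ⟨hp, hmem⟩
    have ht : ∀ q ∈ t, PySem.List.pyGet? ts q.1 = some q.2 ∧ q.2 ∈ ts :=
      fun q hq => hl q (List.mem_cons_of_mem p hq)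
    simp only [List.foldl_cons]
    apply ih ht
    unfold pvCandOf
    by_cases hf : 3 < (pvFields p.2).length
    · simp only [if_pos hf]
      cases hg : PySem.List.pyGet? (pvFields p.2) (-1) with
      | none => exact ⟨hcnt, hnn, hstr⟩
      | some lf =>
        dsimp only
        cases ho : PySem.Int.ofChars? lf with
        | none => exact ⟨hcnt, hnn, hstr⟩
        | some c =>
          dsimp only
          by_cases hpos : c > 0
          · simp only [if_pos hpos]
            by_cases hgt : c > stA.2
            · have hgt' : c > stS.2 := by omega
              simp only [if_pos hgt, pvMStep, if_pos hgt']
              refine ⟨rfl, by omega, ?_⟩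
              have hsome : (PySem.List.index? ts p.2).isSome :=
                (PySem.List.index?_isSome_iff ts p.2).mpr hmem
              rcases hidx : PySem.List.index? ts p.2 with _ | k
              · rw [hidx] at hsome; cases hsome
              · rcases PySem.List.getElem_of_index?_eq_some hidx with ⟨hk, hvk, _⟩
                rw [hp]
                simp only [Option.getD_some, PySem.List.pyGet?_natCast]
                simp [List.getElem?_eq_getElem hk, hvk]
            · have hgt' : ¬ c > stS.2 := by omega
              simp only [if_neg hgt, pvMStep, if_neg hgt']
              exact ⟨hcnt, hnn, hstr⟩
          · have hgt : ¬ c > stA.2 := by omega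
            simp only [if_neg hpos, if_neg hgt]
            exact ⟨hcnt, hnn, hstr⟩
    · simp only [if_neg hf]
      exact ⟨hcnt, hnn, hstr⟩

-- the candidate-fold over the enumerated items is A's running-max fold over the candidate list
lemma pvFoldS (l : List (Int × String)) (st : Int × Int) :
    l.foldl
      (fun (st : Int × Int) p =>
        match pvCandOf p with
        | some y => pvMStep st y
        | none => st) st = (l.filterMap pvCandOf).foldl pvMStep st := by
  induction l generalizing st with
  | nil => rfl
  | cons p t ih => cases h : pvCandOf p <;> simp [h, ih, List.foldl_cons]

-- sorted2 with keys (-count, index) is sorted with the lexicographic key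
lemma pvSorted2_eq_lex (xs : List (Int × Int)) :
    PySem.List.sorted2 xs (fun t => -t.2) (fun t => t.1) =
      PySem.List.sorted xs (fun t => toLex ((-t.2 : Int), (t.1 : Int))) := by
  rw [PySem.List.sorted_eq_foldl_insertBy]
  unfold PySem.List.sorted2
  have hbefore : (fun (a b : Int × Int) =>
      decide ((fun t : Int × Int => -t.2) a < (fun t : Int × Int => -t.2) b) ||
        (!decide ((fun t : Int × Int => -t.2) b < (fun t : Int × Int => -t.2) a) &&
          decide ((fun t : Int × Int => t.1) a < (fun t : Int × Int => t.1) b))) =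
      (fun (a b : Int × Int) =>
        decide ((fun t : Int × Int => toLex ((-t.2 : Int), (t.1 : Int))) a <
          (fun t : Int × Int => toLex ((-t.2 : Int), (t.1 : Int))) b)) := by
    funext a b
    by_cases h1 : -a.2 < -b.2
    · simp [h1, Prod.Lex.lt_iff]
    · by_cases h2 : -b.2 < -a.2
      · simp only [Prod.Lex.lt_iff]
        simp [h1, h2]
        omega
      · have he : -a.2 = -b.2 := by omega
        simp only [Prod.Lex.lt_iff]
        simp [he]
  rw [hbefore]
  rfl

-- ===== assembled proof =====
theorem return_max_count_tag_spec : Claim_equal_return_max_count_tag := by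
  intro ts _ hpre
  unfold Spec_return_max_count_tag return_max_count_tag return_max_count_tag_alt
  -- name the candidate list
  rw [pvCands_eq]
  simp only [List.nil_append]
  set C := List.filterMap pvCandOf (PySem.List.enumerate ts 0) with hC
  have hpw : C.Pairwise (fun a b => a.1 < b.1) := pvPairwise_fst ts
  -- A's fold equals the candidate fold up to pvR
  have henum : ∀ p ∈ PySem.List.enumerate ts 0, PySem.List.pyGet? ts p.1 = some p.2 ∧ p.2 ∈ ts := by
    intro p hp
    rcases (PySem.List.mem_enumerate_iff ts 0 p).mp hp with ⟨k, hk, rfl⟩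
    refine ⟨by simp [PySem.List.pyGet?_natCast, List.getElem?_eq_getElem hk], by simp [List.getElem_mem hk]⟩
  have hgen : ∀ (f : (Int × Int) → String → (Int × Int)) (init : Int × Int),
      ts.foldl f init = (PySem.List.enumerate ts 0).foldl (fun s p => f s p.2) init := by
    intro f init
    conv_lhs => rw [← PySem.List.map_snd_enumerate ts 0]
    rw [List.foldl_map]
  have hfoldA :
      ts.foldl
        (fun (st : Int × Int) item =>
          if 3 < (pvFields item).length then
            match PySem.List.pyGet? (pvFields item) (-1) with
            | none => st
            | some lastField =>
              match PySem.Int.ofChars? lastField with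
              | none => st
              | some tempCount =>
                if tempCount > st.2 then
                  ((((PySem.List.index? ts item).getD 0 : Nat) : Int), tempCount)
                else st
          else st) ((0 : Int), (0 : Int)) =
      (PySem.List.enumerate ts 0).foldl
        (fun (st : Int × Int) p =>
          if 3 < (pvFields p.2).length then
            match PySem.List.pyGet? (pvFields p.2) (-1) with
            | none => st
            | some lastField =>
              match PySem.Int.ofChars? lastField with
              | none => st
              | some tempCount =>
                if tempCount > st.2 then
                  ((((PySem.List.index? ts p.2).getD 0 : Nat) : Int), tempCount)
                else st
          else st) ((0 : Int), (0 : Int)) := by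
    exact hgen _ _
  have hR := pvLockstep ts (PySem.List.enumerate ts 0) henum ((0 : Int), (0 : Int)) ((0 : Int), (0 : Int))
    ⟨rfl, le_refl 0, rfl⟩
  rw [← hfoldA] at hR
  have hff := pvFoldS (PySem.List.enumerate ts 0) ((0 : Int), (0 : Int))
  rw [← hC] at hff
  rw [hff] at hR
  set stA := ts.foldl
        (fun (st : Int × Int) item =>
          if 3 < (pvFields item).length then
            match PySem.List.pyGet? (pvFields item) (-1) with
            | none => st
            | some lastField =>
              match PySem.Int.ofChars? lastField with
              | none => st
              | some tempCount =>
                if tempCount > st.2 then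
                  ((((PySem.List.index? ts item).getD 0 : Nat) : Int), tempCount)
                else st
          else st) ((0 : Int), (0 : Int)) with hstA
  set m := C.foldl pvMStep ((0 : Int), (0 : Int)) with hm
  rcases hR with ⟨hcnt, hnn, hstr⟩
  rcases pvFold_max_spec C hpw ((0 : Int), (0 : Int)) with ⟨hmem, _, hmax, hfirst, hstrict⟩
  rw [← hm] at hmem hmax hfirst hstrict
  by_cases hCnil : C = []
  · -- no positive candidate: both return tag_options[0]
    have hm0 : m = ((0 : Int), (0 : Int)) := by rw [hm, hCnil]; rfl
    simp only [hCnil, List.isEmpty_nil, if_pos]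
    rw [hstr, hm0]
  · -- B takes the head of the (-count, index)-sorted candidates
    simp only [List.isEmpty_iff, hCnil, if_false]
    rw [pvSorted2_eq_lex]
    set key : Int × Int → Lex (Int × Int) := fun t => toLex ((-t.2 : Int), (t.1 : Int)) with hkey
    rcases hs : PySem.List.sorted C key with _ | ⟨h0, srest⟩
    · exact absurd ((PySem.List.sorted_eq_nil_iff C key false).mp hs) hCnil
    · have hhead_min : ∀ y ∈ C, key h0 ≤ key y := PySem.List.key_head_sorted_le C key hs
      have hh0mem : h0 ∈ C := by
        have := (PySem.List.sorted_perm C key false).mem_iff (a := h0)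
        rw [hs] at this
        exact this.mp List.mem_cons_self
      have hmemC : m ∈ C := by
        rcases hmem with h | h
        · -- m = (0,0) impossible: C nonempty and all its counts positive
          exfalso
          rcases List.exists_mem_of_ne_nil C hCnil with ⟨y, hy⟩
          rcases List.mem_filterMap.mp (hC ▸ hy) with ⟨p, _, hpy⟩
          have hpos := pvCandOf_pos hpy
          have := hmax y hy
          rw [h] at this
          simp at this
          omega
        · exact h
      have hmne : m ≠ ((0 : Int), (0 : Int)) := by
        intro he
        rcases List.mem_filterMap.mp (hC ▸ hmemC) with ⟨p, _, hpy⟩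
        have := pvCandOf_pos hpy
        rw [he] at this
        simp at this
      have hm_min : ∀ y ∈ C, key m ≤ key y := by
        intro y hy
        have h1 : y.2 ≤ m.2 := hmax y hy
        by_cases heq : y.2 = m.2
        · rcases hfirst y hy heq with h | h
          · exact absurd h hmne
          · rw [hkey]
            simp only [Prod.Lex.le_iff]
            right
            constructor
            · simp; omega
            · simpa using h
        · rw [hkey]
          simp only [Prod.Lex.le_iff]
          left
          simp; omega
      have hkeyeq : key h0 = key m :=
        le_antisymm (hhead_min m hmemC) (hm_min h0 hh0mem)
      have hfst : h0.1 = m.1 := by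
        rw [hkey] at hkeyeq
        have := toLex.injective hkeyeq
        have h2 := congrArg Prod.snd this
        simpa using h2
      have h0m : h0 = m := pvFst_inj hpw hh0mem hmemC hfst
      have hget0 : PySem.List.pyGet? (h0 :: srest) 0 = some h0 := by
        simp [PySem.List.pyGet?, PySem.List.pyIdx?]
      rw [hget0]
      simp only [Option.getD_some]
      rw [h0m]
      exact hstr
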